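-- pv_equiv track=rewrite | github.com/DanishShaikh18/Daily-Problem-Solving | Easy/1909-remove-one-element-to-make-the-array-strictly-increasing.py | canBeIncreasing
-- ===== SOURCE A (Python) =====
-- from typing import List
--
-- def canBeIncreasing(nums: List[int]) -> bool:
--     ct = 0
--     for i in range(len(nums) - 1):
--         if nums[i] >= nums[i + 1]:
--             ct += 1
--             if i > 0 and nums[i - 1] >= nums[i + 1]:
--                 if i + 2 < len(nums) and nums[i] >= nums[i + 2]:
--                     return False
--     return ct <= 1
-- ===== SOURCE B (Python) =====
-- from typing import List
--
-- def canBeIncreasing(nums: List[int]) -> bool: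
--     if len(nums) <= 1:
--         return True
--
--     def increasing_without(skip: int) -> bool:
--         prev = None
--         for j, v in enumerate(nums):
--             if j == skip:
--                 continue
--             if prev is not None and prev >= v:
--                 return False
--             prev = v
--         return True
--
--     return any(increasing_without(i) for i in range(len(nums)))
-- ===== Notes on version B (the rewrite author's own statement) =====
-- stated objective: alternative
-- what changed: Replaces A's single clever pass (descent counter with a local three-element look-around and early exit) by the direct brute force: try deleting each index in turn and rescan the remainder for strict increase.
import Mathlib
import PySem

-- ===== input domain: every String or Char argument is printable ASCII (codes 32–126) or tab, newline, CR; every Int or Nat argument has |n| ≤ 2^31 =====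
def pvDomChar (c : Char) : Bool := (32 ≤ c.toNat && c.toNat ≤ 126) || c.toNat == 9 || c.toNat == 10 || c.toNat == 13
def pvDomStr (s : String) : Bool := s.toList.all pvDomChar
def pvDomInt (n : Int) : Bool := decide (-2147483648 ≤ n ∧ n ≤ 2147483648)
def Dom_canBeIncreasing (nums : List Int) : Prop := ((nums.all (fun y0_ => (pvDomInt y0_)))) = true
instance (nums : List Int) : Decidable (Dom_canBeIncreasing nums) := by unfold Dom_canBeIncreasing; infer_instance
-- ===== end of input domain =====

-- B replaces A's single counting pass by the brute force "try deleting each index, rescan the rest";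
-- objective: alternative (a different, simpler-to-trust algorithm; B is O(n^2), not faster).

-- ===== PORT A =====
-- the 'for i in range(len(nums) - 1)' loop with its early 'return False', over the remaining index list
def canBeIncreasingGo (nums : List Int) (ct : Int) : List Int → Bool
  | [] => decide (ct ≤ 1)
  | i :: rest =>
    if PySem.List.pyGetD nums i 0 ≥ PySem.List.pyGetD nums (i + 1) 0 then
      let ct' := ct + 1
      if i > 0 ∧ PySem.List.pyGetD nums (i - 1) 0 ≥ PySem.List.pyGetD nums (i + 1) 0 then
        if i + 2 < (nums.length : Int) ∧ PySem.List.pyGetD nums i 0 ≥ PySem.List.pyGetD nums (i + 2) 0 then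
          false
        else canBeIncreasingGo nums ct' rest
      else canBeIncreasingGo nums ct' rest
    else canBeIncreasingGo nums ct rest

def canBeIncreasing (nums : List Int) : Bool :=
  canBeIncreasingGo nums 0 (PySem.List.pyRange 0 ((nums.length : Int) - 1) 1)

-- ===== PORT B =====
-- helper 'increasing_without(skip)': walk enumerate(nums) skipping index 'skip', tracking prev
-- ('prev is not None and prev >= v' is the Option.elim test)
def incWithoutGo (skip : Int) : Option Int → List (Int × Int) → Bool
  | _, [] => true
  | prev, (j, v) :: rest =>
    if j = skip then incWithoutGo skip prev rest
    else if prev.elim false (fun p => decide (p ≥ v)) then false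
    else incWithoutGo skip (some v) rest

def canBeIncreasing_alt (nums : List Int) : Bool :=
  if nums.length ≤ 1 then true
  else (PySem.List.pyRange 0 (nums.length : Int) 1).any
    (fun i => incWithoutGo i none (PySem.List.enumerate nums 0))

-- ===== PRECONDITION & SPEC =====
def Spec_canBeIncreasing (nums : List Int) (out : Bool) : Prop := out = canBeIncreasing_alt nums
instance (nums : List Int) (out : Bool) : Decidable (Spec_canBeIncreasing nums out) := by unfold Spec_canBeIncreasing; infer_instance

-- ===== CLAIM (what is proved, stated in full; the proofs are below) =====
def Claim_equal_canBeIncreasing : Prop := ∀ (nums : List Int), Dom_canBeIncreasing nums → Spec_canBeIncreasing nums (canBeIncreasing nums)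

-- ===== LEMMAS AND PROOFS =====

-- value at index i (total; every index the proofs use is in range)
def gv (nums : List Int) (i : Nat) : Int := nums.getD i 0

-- descent at i (meaningful for i + 1 < length)
def descB (nums : List Int) (i : Nat) : Bool := decide (gv nums (i + 1) ≤ gv nums i)

-- A's early-return-False condition at i
def badB (nums : List Int) (i : Nat) : Bool :=
  descB nums i && decide (0 < i) && decide (gv nums (i + 1) ≤ gv nums (i - 1)) &&
    decide (i + 2 < nums.length) && decide (gv nums (i + 2) ≤ gv nums i)

def optCons (prev : Option Int) (l : List Int) : List Int :=
  match prev with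
  | some p => p :: l
  | none => l

lemma pyGetD_gv (nums : List Int) (m : Nat) : PySem.List.pyGetD nums (m : Int) 0 = gv nums m :=
  PySem.List.pyGetD_natCast nums m 0

lemma canBeIncreasingGo_spec (nums : List Int) (l : List Nat) : ∀ (ct : Int),
    canBeIncreasingGo nums ct (l.map (Nat.cast : Nat → Int)) =
      (!(l.any (badB nums)) && decide (ct + (l.countP (descB nums) : Int) ≤ 1)) := by
  induction l with
  | nil => intro ct; simp [canBeIncreasingGo]
  | cons k rest ih =>
    intro ct
    have e1 : ((k : Int) + 1) = ((k + 1 : Nat) : Int) := by push_cast; ring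
    have e2 : ((k : Int) + 2) = ((k + 2 : Nat) : Int) := by push_cast; ring
    rw [List.map_cons, canBeIncreasingGo]
    simp only [e1, e2, pyGetD_gv, ge_iff_le]
    rw [List.any_cons, List.countP_cons]
    by_cases hd : gv nums (k + 1) ≤ gv nums k
    · rw [if_pos hd]
      by_cases h0 : (0:Int) < (k:Int)
      · have hk0 : 0 < k := by exact_mod_cast h0
        have e3 : ((k : Int) - 1) = ((k - 1 : Nat) : Int) := by omega
        rw [e3, pyGetD_gv]
        by_cases hmid : gv nums (k + 1) ≤ gv nums (k - 1)
        · rw [if_pos ⟨h0, hmid⟩]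
          by_cases hlen : k + 2 < nums.length
          · by_cases hlast : gv nums (k + 2) ≤ gv nums k
            · rw [if_pos ⟨by exact_mod_cast hlen, hlast⟩]
              have hbad : badB nums k = true := by
                simp only [badB, descB]
                simp [hd, hk0, hmid, hlen, hlast]
              simp [hbad]
            · rw [if_neg (by rintro ⟨-, h⟩; exact hlast h)]
              have hbad : badB nums k = false := by
                simp only [badB, descB]
                simp [hlast]
              have hdesc : descB nums k = true := by simp [descB, hd]
              rw [ih (ct + 1)]
              have : ct + 1 + ((rest.countP (descB nums) : Nat) : Int) =
                  ct + (((rest.countP (descB nums) : Nat) : Int) + 1) := by ring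
              simp [hbad, hdesc, this]
          · rw [if_neg (by rintro ⟨h, -⟩; exact hlen (by exact_mod_cast h))]
            have hbad : badB nums k = false := by
              simp only [badB, descB]
              simp [hlen]
            have hdesc : descB nums k = true := by simp [descB, hd]
            rw [ih (ct + 1)]
            have : ct + 1 + ((rest.countP (descB nums) : Nat) : Int) =
                ct + (((rest.countP (descB nums) : Nat) : Int) + 1) := by ring
            simp [hbad, hdesc, this]
        · rw [if_neg (by rintro ⟨-, h⟩; exact hmid h)]
          have hbad : badB nums k = false := by
            simp only [badB, descB]
            simp [hmid]
          have hdesc : descB nums k = true := by simp [descB, hd]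
          rw [ih (ct + 1)]
          have : ct + 1 + ((rest.countP (descB nums) : Nat) : Int) =
              ct + (((rest.countP (descB nums) : Nat) : Int) + 1) := by ring
          simp [hbad, hdesc, this]
      · rw [if_neg (by rintro ⟨h, -⟩; exact h0 h)]
        have hk0 : k = 0 := by omega
        have hbad : badB nums k = false := by
          simp only [badB, descB]
          simp [hk0]
        have hdesc : descB nums k = true := by simp [descB, hd]
        rw [ih (ct + 1)]
        have : ct + 1 + ((rest.countP (descB nums) : Nat) : Int) =
            ct + (((rest.countP (descB nums) : Nat) : Int) + 1) := by ring
        simp [hbad, hdesc, this]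
    · rw [if_neg hd]
      have hbad : badB nums k = false := by
        simp only [badB, descB]
        simp [hd]
      have hdesc : descB nums k = false := by simp [descB, hd]
      rw [ih ct]
      simp [hbad, hdesc]

lemma incWithoutGo_spec (nums : List Int) : ∀ (skip s : Nat) (prev : Option Int),
    incWithoutGo (skip : Int) prev (PySem.List.enumerate nums (s : Int)) =
      decide (List.IsChain (· < ·)
        (optCons prev (if s ≤ skip then nums.eraseIdx (skip - s) else nums))) := by
  induction nums with
  | nil =>
    intro skip s prev
    simp only [PySem.List.enumerate_nil, incWithoutGo]
    cases prev <;> simp [optCons]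
  | cons v rest ih =>
    intro skip s prev
    rw [PySem.List.enumerate_cons, incWithoutGo]
    have e1 : ((s : Int) + 1) = ((s + 1 : Nat) : Int) := by push_cast; ring
    by_cases hjs : s = skip
    · rw [if_pos (by exact_mod_cast hjs)]
      rw [e1, ih skip (s+1) prev]
      have : ¬ (s + 1 ≤ skip) := by omega
      rw [if_neg this, if_pos (le_of_eq hjs), hjs, Nat.sub_self, List.eraseIdx_zero, List.tail_cons]
    · rw [if_neg (by exact_mod_cast hjs)]
      by_cases hle : s ≤ skip
      · have hss : s + 1 ≤ skip := by omega
        have herase : (v :: rest).eraseIdx (skip - s) = v :: rest.eraseIdx (skip - (s+1)) := by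
          have : skip - s = (skip - (s+1)) + 1 := by omega
          rw [this, List.eraseIdx_cons_succ]
        rw [if_pos hle, herase]
        cases prev with
        | none =>
          rw [show (Option.elim (none : Option Int) false (fun p => decide (p ≥ v))) = false from rfl,
            if_neg (by simp), e1, ih skip (s+1) (some v), if_pos hss]
          simp [optCons]
        | some p =>
          rw [show (Option.elim (some p) false (fun q => decide (q ≥ v))) = decide (p ≥ v) from rfl]
          by_cases hpv : p ≥ v
          · rw [if_pos (by simp [hpv])]
            simp only [optCons]
            rw [eq_comm, decide_eq_false_iff_not, List.isChain_cons_cons]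
            rintro ⟨h, -⟩; omega
          · rw [if_neg (by simp [hpv]), e1, ih skip (s+1) (some v), if_pos hss]
            simp only [optCons]
            rw [decide_eq_decide, List.isChain_cons_cons]
            simp [lt_of_not_ge hpv]
      · have hgt : ¬ (s + 1 ≤ skip) := by omega
        rw [if_neg hle]
        cases prev with
        | none =>
          rw [show (Option.elim (none : Option Int) false (fun p => decide (p ≥ v))) = false from rfl,
            if_neg (by simp), e1, ih skip (s+1) (some v), if_neg hgt]
          simp [optCons]
        | some p =>
          rw [show (Option.elim (some p) false (fun q => decide (q ≥ v))) = decide (p ≥ v) from rfl]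
          by_cases hpv : p ≥ v
          · rw [if_pos (by simp [hpv])]
            simp only [optCons]
            rw [eq_comm, decide_eq_false_iff_not, List.isChain_cons_cons]
            rintro ⟨h, -⟩; omega
          · rw [if_neg (by simp [hpv]), e1, ih skip (s+1) (some v), if_neg hgt]
            simp only [optCons]
            rw [decide_eq_decide, List.isChain_cons_cons]
            simp [lt_of_not_ge hpv]

lemma erase_getD (nums : List Int) (k m : Nat) (hk : k < nums.length) (hm : m < nums.length - 1) :
    (nums.eraseIdx k).getD m 0 = if m < k then gv nums m else gv nums (m + 1) := by
  have hlen : (nums.eraseIdx k).length = nums.length - 1 := by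
    rw [List.length_eraseIdx]; simp [hk]
  rw [List.getD_eq_getElem _ _ (by omega : m < (nums.eraseIdx k).length)]
  rw [List.getElem_eraseIdx]
  split
  · exact (List.getD_eq_getElem nums 0 (by omega)).symm
  · exact (List.getD_eq_getElem nums 0 (by omega)).symm

lemma chain_erase_iff (nums : List Int) (k : Nat) (hk : k < nums.length) :
    List.IsChain (· < ·) (nums.eraseIdx k) ↔
      ∀ m, m + 1 < nums.length - 1 →
        (nums.eraseIdx k).getD m 0 < (nums.eraseIdx k).getD (m + 1) 0 := by
  have hlen : (nums.eraseIdx k).length = nums.length - 1 := by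
    rw [List.length_eraseIdx]; simp [hk]
  rw [List.isChain_iff_getElem]
  constructor
  · intro h m hm
    rw [List.getD_eq_getElem _ _ (by omega : m < (nums.eraseIdx k).length),
        List.getD_eq_getElem _ _ (by omega : m + 1 < (nums.eraseIdx k).length)]
    exact h m (by omega)
  · intro h m hm
    have := h m (by omega)
    rwa [List.getD_eq_getElem _ _ (by omega : m < (nums.eraseIdx k).length),
        List.getD_eq_getElem _ _ (by omega : m + 1 < (nums.eraseIdx k).length)] at this

lemma kill_far (nums : List Int) (i k : Nat) (hi : i + 1 < nums.length)
    (hd : gv nums (i + 1) ≤ gv nums i) (hk : k < nums.length) (hki : k ≠ i) (hki1 : k ≠ i + 1) :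
    ¬ List.IsChain (· < ·) (nums.eraseIdx k) := by
  rw [chain_erase_iff nums k hk]
  intro h
  by_cases hik : i < k
  · have := h i (by omega)
    rw [erase_getD nums k i hk (by omega), erase_getD nums k (i+1) hk (by omega)] at this
    rw [if_pos (by omega), if_pos (by omega)] at this
    omega
  · have hki' : k < i := by omega
    have := h (i - 1) (by omega)
    rw [erase_getD nums k (i-1) hk (by omega), erase_getD nums k (i-1+1) hk (by omega)] at this
    rw [if_neg (by omega), if_neg (by omega)] at this
    have e1 : i - 1 + 1 = i := by omega
    rw [e1] at this
    omega

lemma kill_adj (nums : List Int) (p : Nat) (hp : p + 2 < nums.length)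
    (h1 : gv nums (p + 1) ≤ gv nums p) (h2 : gv nums (p + 2) ≤ gv nums (p + 1)) :
    ¬ List.IsChain (· < ·) (nums.eraseIdx (p + 1)) := by
  rw [chain_erase_iff nums (p+1) (by omega)]
  intro h
  have := h p (by omega)
  rw [erase_getD nums (p+1) p (by omega) (by omega),
      erase_getD nums (p+1) (p+1) (by omega) (by omega)] at this
  rw [if_pos (by omega), if_neg (by omega), show p + 1 + 1 = p + 2 from by omega] at this
  omega

lemma bool_tf (b : Bool) : b = true ∨ b = false := by cases b <;> simp

lemma main_iff (nums : List Int) (hn : 2 ≤ nums.length) :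
    ((∀ i, i + 1 < nums.length → badB nums i = false) ∧
      (List.range (nums.length - 1)).countP (descB nums) ≤ 1) ↔
      (∃ k, k < nums.length ∧ List.IsChain (· < ·) (nums.eraseIdx k)) := by
  set n := nums.length with hn_def
  have hmemS : ∀ j, j ∈ (List.range (n - 1)).filter (descB nums) ↔
      (j < n - 1 ∧ descB nums j = true) := by
    intro j; simp [List.mem_filter, List.mem_range]
  have hcount : (List.range (n - 1)).countP (descB nums) =
      ((List.range (n - 1)).filter (descB nums)).length := List.countP_eq_length_filter
  constructor
  · rintro ⟨hbad, hct⟩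
    rcases hS : (List.range (n - 1)).filter (descB nums) with _ | ⟨i, _ | ⟨b, t2⟩⟩
    · -- no descent: remove index 0
      have hno : ∀ j, j + 1 < n → gv nums j < gv nums (j + 1) := by
        intro j hj
        have : ¬ (j < n - 1 ∧ descB nums j = true) := by
          rw [← hmemS, hS]; simp
        have hdf : descB nums j = false := by
          rcases bool_tf (descB nums j) with h | h
          · exact absurd ⟨by omega, h⟩ this
          · exact h
        simp only [descB, decide_eq_false_iff_not] at hdf
        omega
      refine ⟨0, by omega, ?_⟩
      rw [chain_erase_iff nums 0 (by omega)]
      intro m hm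
      rw [erase_getD nums 0 m (by omega) (by omega), erase_getD nums 0 (m+1) (by omega) (by omega),
        if_neg (by omega), if_neg (by omega)]
      exact hno (m + 1) (by omega)
    · -- exactly one descent, at i
      have hiS : i < n - 1 ∧ descB nums i = true := by rw [← hmemS, hS]; simp
      obtain ⟨hi, hdesci⟩ := hiS
      have hdi : gv nums (i + 1) ≤ gv nums i := by
        simpa [descB] using hdesci
      have hno : ∀ j, j + 1 < n → j ≠ i → gv nums j < gv nums (j + 1) := by
        intro j hj hji
        have : j ∈ (List.range (n - 1)).filter (descB nums) ↔ j = i := by rw [hS]; simp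
        have h2 := (hmemS j).symm.trans this
        have hdf : descB nums j = false := by
          rcases bool_tf (descB nums j) with h | h
          · exact absurd (h2.mp ⟨by omega, h⟩) hji
          · exact h
        simp only [descB, decide_eq_false_iff_not] at hdf
        omega
      have hbadi := hbad i (by omega)
      have hnotall : ¬ (descB nums i = true ∧ 0 < i ∧ gv nums (i + 1) ≤ gv nums (i - 1) ∧
          i + 2 < n ∧ gv nums (i + 2) ≤ gv nums i) := by
        rintro ⟨h1, h2, h3, h4, h5⟩
        rw [badB] at hbadi
        simp [h1, h2, h3, h5] at hbadi
        omega
      by_cases hA : 0 < i ∧ gv nums (i + 1) ≤ gv nums (i - 1)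
      · -- remove i+1; A guarantees ¬(i+2<n) ∨ gv i < gv (i+2)
        have hB : ¬ (i + 2 < n) ∨ gv nums i < gv nums (i + 2) := by
          by_cases h1 : i + 2 < n
          · right
            by_contra h2
            exact hnotall ⟨hdesci, hA.1, hA.2, h1, by omega⟩
          · exact Or.inl h1
        refine ⟨i + 1, by omega, ?_⟩
        rw [chain_erase_iff nums (i+1) (by omega)]
        intro m hm
        rw [erase_getD nums (i+1) m (by omega) (by omega),
            erase_getD nums (i+1) (m+1) (by omega) (by omega)]
        by_cases hmi : m < i + 1
        · by_cases hm2 : m + 1 < i + 1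
          · rw [if_pos hmi, if_pos hm2]
            exact hno m (by omega) (by omega)
          · have hmeq : m = i := by omega
            rw [if_pos hmi, if_neg hm2]
            have hlen : i + 2 < n := by omega
            rcases hB with h | h
            · exact absurd hlen h
            · rw [hmeq, show i + 1 + 1 = i + 2 from by omega]; exact h
        · rw [if_neg hmi, if_neg (by omega)]
          exact hno (m + 1) (by omega) (by omega)
      · -- remove i; i = 0 or gv (i-1) < gv (i+1)
        refine ⟨i, by omega, ?_⟩
        rw [chain_erase_iff nums i (by omega)]
        intro m hm
        rw [erase_getD nums i m (by omega) (by omega),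
            erase_getD nums i (m+1) (by omega) (by omega)]
        by_cases hmi : m < i
        · by_cases hm2 : m + 1 < i
          · rw [if_pos hmi, if_pos hm2]
            exact hno m (by omega) (by omega)
          · have hmeq : m + 1 = i := by omega
            rw [if_pos hmi, if_neg hm2]
            have h0i : 0 < i := by omega
            have hmid : gv nums (i - 1) < gv nums (i + 1) := by
              by_contra h
              exact hA ⟨h0i, by omega⟩
            rw [show m = i - 1 from by omega, show i - 1 + 1 + 1 = i + 1 from by omega]
            exact hmid
        · rw [if_neg hmi, if_neg (by omega)]
          exact hno (m + 1) (by omega) (by omega)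
    · -- at least two descents: contradicts ct ≤ 1
      exfalso
      rw [hcount, hS] at hct
      simp at hct
  · rintro ⟨k, hk, hchain⟩
    constructor
    · intro i hi
      by_contra hbt
      have hbadi : badB nums i = true := by
        rcases bool_tf (badB nums i) with h | h
        · exact h
        · exact absurd h hbt
      simp only [badB, Bool.and_eq_true, decide_eq_true_eq] at hbadi
      obtain ⟨⟨⟨⟨hdesc, h0⟩, hmid⟩, hlen⟩, hlast⟩ := hbadi
      have hdi : gv nums (i + 1) ≤ gv nums i := by simpa [descB] using hdesc
      by_cases hki : k = i
      · rw [chain_erase_iff nums k hk] at hchain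
        have := hchain (i - 1) (by omega)
        rw [erase_getD nums k (i-1) hk (by omega), erase_getD nums k (i-1+1) hk (by omega),
          hki, if_pos (by omega), if_neg (by omega),
          show i - 1 + 1 + 1 = i + 1 from by omega] at this
        omega
      · by_cases hki1 : k = i + 1
        · rw [chain_erase_iff nums k hk] at hchain
          have := hchain i (by omega)
          rw [erase_getD nums k i hk (by omega), erase_getD nums k (i+1) hk (by omega),
            hki1, if_pos (by omega), if_neg (by omega),
            show i + 1 + 1 = i + 2 from by omega] at this
          omega
        · exact kill_far nums i k (by omega) hdi hk hki hki1 hchain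
    · by_contra hct
      have h2 : 2 ≤ ((List.range (n - 1)).filter (descB nums)).length := by
        rw [← hcount]; omega
      rcases hS : (List.range (n - 1)).filter (descB nums) with _ | ⟨a, _ | ⟨b, t2⟩⟩
      · rw [hS] at h2; simp at h2
      · rw [hS] at h2; simp at h2
      · have hnd : ((List.range (n - 1)).filter (descB nums)).Nodup :=
          List.Nodup.filter _ (List.nodup_range)
        rw [hS] at hnd
        have hab : a ≠ b := by
          intro h; rw [h] at hnd; simp at hnd
        have haS : a < n - 1 ∧ descB nums a = true := by rw [← hmemS, hS]; simp
        have hbS : b < n - 1 ∧ descB nums b = true := by rw [← hmemS, hS]; simp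
        have hda : gv nums (a + 1) ≤ gv nums a := by simpa [descB] using haS.2
        have hdb : gv nums (b + 1) ≤ gv nums b := by simpa [descB] using hbS.2
        by_cases hka : k ≠ a ∧ k ≠ a + 1
        · exact kill_far nums a k (by omega) hda hk hka.1 hka.2 hchain
        · by_cases hkb : k ≠ b ∧ k ≠ b + 1
          · exact kill_far nums b k (by omega) hdb hk hkb.1 hkb.2 hchain
          · have hka' : k = a ∨ k = a + 1 := by tauto
            have hkb' : k = b ∨ k = b + 1 := by tauto
            rcases hka' with ha' | ha' <;> rcases hkb' with hb' | hb'
            · omega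
            · -- k = a = b + 1
              have h2' : gv nums (b + 2) ≤ gv nums (b + 1) := by
                rw [show b + 2 = a + 1 from by omega, show b + 1 = a from by omega]
                exact hda
              exact kill_adj nums b (by omega) hdb h2' (by rwa [ha', show a = b + 1 from by omega] at hchain)
            · -- k = a + 1 = b
              have h2' : gv nums (a + 2) ≤ gv nums (a + 1) := by
                rw [show a + 2 = b + 1 from by omega, show a + 1 = b from by omega]
                exact hdb
              exact kill_adj nums a (by omega) hda h2' (by rwa [ha'] at hchain)
            · omega


-- ---- glue: the ports in closed characterized form ----
lemma canBeIncreasing_char (nums : List Int) :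
    canBeIncreasing nums =
      (!((List.range (nums.length - 1)).any (badB nums)) &&
        decide (((List.range (nums.length - 1)).countP (descB nums) : Int) ≤ 1)) := by
  unfold canBeIncreasing
  rw [PySem.List.pyRange_one]
  have e : ((nums.length : Int) - 1 - 0).toNat = nums.length - 1 := by omega
  rw [e]
  rw [show (fun (k : Nat) => (0 : Int) + (k : Int)) = (Nat.cast : Nat → Int) from by
      funext k; ring]
  rw [canBeIncreasingGo_spec nums (List.range (nums.length - 1)) 0, zero_add]

lemma canBeIncreasing_alt_char (nums : List Int) :
    canBeIncreasing_alt nums =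
      (if nums.length ≤ 1 then true
       else (List.range nums.length).any
         (fun k => decide (List.IsChain (· < ·) (nums.eraseIdx k)))) := by
  unfold canBeIncreasing_alt
  by_cases h : nums.length ≤ 1
  · rw [if_pos h, if_pos h]
  · rw [if_neg h, if_neg h]
    rw [PySem.List.pyRange_one]
    have e : ((nums.length : Int) - 0).toNat = nums.length := by omega
    rw [e, List.any_map]
    congr 1
    funext k
    have e0 : ((0 : Int) + (k : Int)) = ((k : Nat) : Int) := by ring
    have ez : (0 : Int) = ((0 : Nat) : Int) := by norm_num
    simp only [Function.comp_apply, e0]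
    rw [ez, incWithoutGo_spec nums k 0 none]
    rw [if_pos (Nat.zero_le k), Nat.sub_zero]
    rfl

-- ===== VERDICT (by name: the statement is the Claim_ definition above) =====
lemma bool_eq_iff (a b : Bool) : (a = b) ↔ ((a = true) ↔ (b = true)) := by
  cases a <;> cases b <;> simp

-- ===== VERDICT (by name: the statement is the Claim_ definition above) =====
theorem canBeIncreasing_spec : Claim_equal_canBeIncreasing := by
  intro nums _
  unfold Spec_canBeIncreasing
  rw [canBeIncreasing_char, canBeIncreasing_alt_char]
  by_cases hn : nums.length ≤ 1
  · rw [if_pos hn]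
    have e : nums.length - 1 = 0 := by omega
    rw [e]
    simp
  · rw [if_neg hn]
    have h2 : 2 ≤ nums.length := by omega
    have hmain := main_iff nums h2
    rw [bool_eq_iff]
    simp only [Bool.and_eq_true, Bool.not_eq_true', List.any_eq_false, List.any_eq_true,
      decide_eq_true_eq, List.mem_range]
    constructor
    · rintro ⟨hb, hc⟩
      obtain ⟨k, hk, hch⟩ := hmain.mp ⟨fun i hi => Bool.not_eq_true _ ▸ (hb i (by omega)), by exact_mod_cast hc⟩
      exact ⟨k, hk, hch⟩
    · rintro ⟨k, hk, hch⟩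
      obtain ⟨hb, hc⟩ := hmain.mpr ⟨k, hk, hch⟩
      exact ⟨fun i hi => by simpa using hb i (by omega), by exact_mod_cast hc⟩
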